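-- pv_equiv track=rewrite | github.com/Ali-932/haruneko-api | python_client/haruneko_download_service.py | _find_chapter_by_string
-- ===== SOURCE A (Python) =====
-- from typing import Dict, List, Optional, Any, Union
--
-- def _find_chapter_by_string(all_chapters: List[Dict], query: str) -> Optional[Dict]:
--     """Find chapter by string matching (for non-numeric chapter identifiers)"""
--     query_lower = query.lower().strip()
--
--     # Try exact title match
--     for chapter in all_chapters:
--         if chapter.get("title", "").lower().strip() == query_lower:
--             return chapter
--
--     # Try partial match
--     for chapter in all_chapters:
--         if query_lower in chapter.get("title", "").lower():
--             return chapter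
--
--     return None
-- ===== SOURCE B (Python) =====
-- from typing import Dict, List, Optional
--
--
-- def _find_chapter_by_string(all_chapters: List[Dict], query: str) -> Optional[Dict]:
--     """Single pass: return immediately on exact match, remember first partial match."""
--     query_lower = query.lower().strip()
--     partial = None
--     for chapter in all_chapters:
--         t = chapter.get("title", "").lower()
--         if t.strip() == query_lower:
--             return chapter
--         if partial is None and query_lower in t:
--             partial = chapter
--     return partial
-- ===== Notes on version B (the rewrite author's own statement) =====
-- stated objective: alternative
-- what changed: Replaced A's two sequential passes (exact scan, then partial scan) by one pass that returns an exact match immediately and keeps the first partial match in a fallback accumulator.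
import Mathlib
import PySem

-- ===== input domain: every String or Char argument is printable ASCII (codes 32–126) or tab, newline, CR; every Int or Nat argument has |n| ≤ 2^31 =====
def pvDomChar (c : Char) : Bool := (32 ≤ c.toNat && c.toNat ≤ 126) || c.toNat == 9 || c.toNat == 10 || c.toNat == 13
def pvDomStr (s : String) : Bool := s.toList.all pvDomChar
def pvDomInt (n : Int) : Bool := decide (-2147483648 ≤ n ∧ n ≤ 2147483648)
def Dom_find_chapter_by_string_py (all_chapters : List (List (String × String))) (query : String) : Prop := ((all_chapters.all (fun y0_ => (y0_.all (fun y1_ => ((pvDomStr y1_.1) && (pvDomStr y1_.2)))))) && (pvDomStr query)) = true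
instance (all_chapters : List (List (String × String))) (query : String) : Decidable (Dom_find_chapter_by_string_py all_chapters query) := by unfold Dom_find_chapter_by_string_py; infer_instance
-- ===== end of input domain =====

-- B merges A's two sequential passes into one pass with a fallback accumulator (objective: alternative decomposition, same cost).

-- ===== PORT A =====
-- chapter.get("title", "")
def pvGetTitle (ch : List (String × String)) : String :=
  (PySem.Dict.mk ch).getD "title" ""

-- first loop of A: exact title match
def pvExactPass (ql : String) : List (List (String × String)) → Option (List (String × String))
  | [] => none
  | ch :: rest =>
    if PySem.Str.strip (PySem.Str.lower (pvGetTitle ch)) == ql then some ch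
    else pvExactPass ql rest

-- second loop of A: partial match
def pvPartialPass (ql : String) : List (List (String × String)) → Option (List (String × String))
  | [] => none
  | ch :: rest =>
    if PySem.Str.isIn ql (PySem.Str.lower (pvGetTitle ch)) then some ch
    else pvPartialPass ql rest

def find_chapter_by_string_py (all_chapters : List (List (String × String))) (query : String) : Option (List (String × String)) :=
  let query_lower := PySem.Str.strip (PySem.Str.lower query)
  match pvExactPass query_lower all_chapters with
  | some ch => some ch
  | none => pvPartialPass query_lower all_chapters

-- ===== PORT B =====
-- B's single loop, carrying the `partial` accumulator
def pvScan (ql : String) (partialAcc : Option (List (String × String))) :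
    List (List (String × String)) → Option (List (String × String))
  | [] => partialAcc
  | ch :: rest =>
    let t := PySem.Str.lower (pvGetTitle ch)
    if PySem.Str.strip t == ql then some ch
    else pvScan ql (if partialAcc.isNone && PySem.Str.isIn ql t then some ch else partialAcc) rest

def find_chapter_by_string_py_alt (all_chapters : List (List (String × String))) (query : String) : Option (List (String × String)) :=
  pvScan (PySem.Str.strip (PySem.Str.lower query)) none all_chapters

-- ===== PRECONDITION & SPEC =====
def Spec_find_chapter_by_string_py (all_chapters : List (List (String × String))) (query : String) (out : Option (List (String × String))) : Prop := out = find_chapter_by_string_py_alt all_chapters query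
instance (all_chapters : List (List (String × String))) (query : String) (out : Option (List (String × String))) : Decidable (Spec_find_chapter_by_string_py all_chapters query out) := by unfold Spec_find_chapter_by_string_py; infer_instance

-- ===== CLAIM (what is proved, stated in full; the proofs are below) =====
def Claim_equal_find_chapter_by_string_py : Prop := ∀ (all_chapters : List (List (String × String))) (query : String), Dom_find_chapter_by_string_py all_chapters query → Spec_find_chapter_by_string_py all_chapters query (find_chapter_by_string_py all_chapters query)

-- ===== LEMMAS AND PROOFS =====
-- loop invariant: one scan = exact pass, falling back to acc, falling back to partial pass
theorem pvScan_eq (ql : String) (l : List (List (String × String)))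
    (acc : Option (List (String × String))) :
    pvScan ql acc l =
      match pvExactPass ql l with
      | some ch => some ch
      | none => match acc with
        | some p => some p
        | none => pvPartialPass ql l := by
  induction l generalizing acc with
  | nil => cases acc <;> simp [pvScan, pvExactPass, pvPartialPass]
  | cons ch rest ih =>
    by_cases hx : PySem.Str.strip (PySem.Str.lower (pvGetTitle ch)) == ql
    · simp [pvScan, pvExactPass, hx]
    · cases acc with
      | some p =>
        simp [pvScan, pvExactPass, hx, ih]
      | none =>
        simp only [pvScan, pvExactPass, pvPartialPass, hx, ih, Bool.true_and,
          Option.isNone_none]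
        cases pvExactPass ql rest <;> split_ifs <;> simp

-- ===== VERDICT (by name: the statement is the Claim_ definition above) =====
theorem find_chapter_by_string_py_spec : Claim_equal_find_chapter_by_string_py := by
  intro all_chapters query _
  unfold Spec_find_chapter_by_string_py find_chapter_by_string_py find_chapter_by_string_py_alt
  rw [pvScan_eq]
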